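-- pv_equiv track=rewrite | github.com/strikersps/Competitive-Programming | Code-Forces/Wrong-Substraction/wrong_substraction.py | update_number
-- ===== SOURCE A (Python) =====
-- def update_number(n, k):
--     while k:
--         last_digit = n % 10
--         if not last_digit:
--             k -= 1
--             n //= 10
--             continue
--         if last_digit >= k:
--             n -= k
--             break
--         n -= last_digit
--         k -= last_digit
--     return n
-- ===== SOURCE B (Python) =====
-- def update_number(n, k):
--     # Naive direct simulation: perform exactly k elementary operations,
--     # one per loop iteration (drop a trailing zero, otherwise subtract 1).
--     for _ in range(k):
--         if n % 10 == 0: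
--             n //= 10
--         else:
--             n -= 1
--     return n
-- ===== Notes on version B (the rewrite author's own statement) =====
-- stated objective: simpler
-- what changed: B replaces A's batched while-loop (which subtracts the whole last digit at once and has a special early-exit branch when last_digit >= k) by the plain one-operation-per-iteration simulation: a for-loop over range(k) applying a single elementary step each time.
-- outside the precondition, e.g. on update_number(5, -3): A returns 8, B returns 5; on update_number(0, -3): A does not finish within the time limit, B returns 0
import Mathlib
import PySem

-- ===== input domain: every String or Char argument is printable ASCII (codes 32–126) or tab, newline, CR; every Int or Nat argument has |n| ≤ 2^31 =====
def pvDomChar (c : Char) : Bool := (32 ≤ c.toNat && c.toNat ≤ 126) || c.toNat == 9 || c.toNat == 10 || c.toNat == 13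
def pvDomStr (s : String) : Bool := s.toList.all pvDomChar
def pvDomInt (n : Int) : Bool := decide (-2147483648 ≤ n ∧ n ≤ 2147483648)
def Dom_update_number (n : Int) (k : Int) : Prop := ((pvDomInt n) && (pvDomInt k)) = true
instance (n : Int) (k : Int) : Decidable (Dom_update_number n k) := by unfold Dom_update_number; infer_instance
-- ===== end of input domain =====

-- B is the plain one-operation-per-iteration simulation (a for-loop over range(k)) instead of
-- A's batched digit-subtraction loop with its early-exit branch: simpler, same results on k ≥ 0.

-- ===== PORT A =====
-- fuel = k.toNat bounds the loop for k ≥ 0 (each iteration decreases k by at least 1); for k < 0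
-- (outside Pre_) A can diverge, the fuel only makes the port total there.
def update_number_go (fuel : Nat) (n k : Int) : Int :=
  match fuel with
  | 0 => n
  | f + 1 =>
    if k = 0 then n
    else
      let last_digit := PySem.Int.mod n 10
      if last_digit = 0 then update_number_go f (PySem.Int.floordiv n 10) (k - 1)
      else if last_digit ≥ k then n - k
      else update_number_go f (n - last_digit) (k - last_digit)

def update_number (n : Int) (k : Int) : Int := update_number_go k.toNat n k

-- ===== PORT B =====
-- The for-loop over range(k): k.toNat iterations (range(k) is empty for k ≤ 0), each applying
-- one elementary step to n.
def update_number_alt_go : Nat → Int → Int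
  | 0, n => n
  | j + 1, n =>
    update_number_alt_go j
      (if PySem.Int.mod n 10 = 0 then PySem.Int.floordiv n 10 else n - 1)

def update_number_alt (n : Int) (k : Int) : Int := update_number_alt_go k.toNat n

-- ===== PRECONDITION & SPEC =====
-- Pre_ restricts to k ≥ 0, the natural domain of an operation count: for k < 0 A's value
-- (n - k when the last digit is nonzero) is an artefact of the loop condition, and A diverges at n = 0.
def Pre_update_number (n : Int) (k : Int) : Prop := 0 ≤ k
instance (n : Int) (k : Int) : Decidable (Pre_update_number n k) := by unfold Pre_update_number; infer_instance
def pvWitness_update_number : Int × Int := (119, 4)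

def Spec_update_number (n : Int) (k : Int) (out : Int) : Prop := out = update_number_alt n k
instance (n : Int) (k : Int) (out : Int) : Decidable (Spec_update_number n k out) := by unfold Spec_update_number; infer_instance

-- ===== CLAIM (what is proved, stated in full; the proofs are below) =====
def Claim_equal_update_number : Prop := ∀ (n : Int) (k : Int), Dom_update_number n k → Pre_update_number n k → Spec_update_number n k (update_number n k)

-- ===== LEMMAS AND PROOFS =====

-- One elementary Python operation: drop a trailing zero, else subtract 1.
def pvStep (n : Int) : Int := if n % 10 = 0 then n / 10 else n - 1

def pvIter : Nat → Int → Int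
  | 0, n => n
  | j + 1, n => pvIter j (pvStep n)

theorem pvIter_add (a b : Nat) (n : Int) : pvIter (a + b) n = pvIter b (pvIter a n) := by
  induction a generalizing n with
  | zero => simp [pvIter]
  | succ a ih =>
    have : a + 1 + b = (a + b) + 1 := by omega
    rw [this]
    simpa [pvIter] using ih (pvStep n)

theorem pvIter_sub_run (j : Nat) (n : Int) (h : (j : Int) ≤ n % 10) : pvIter j n = n - j := by
  induction j generalizing n with
  | zero => simp [pvIter]
  | succ j ih =>
    have h1 : n % 10 ≠ 0 := by omega
    have hs : pvStep n = n - 1 := by simp [pvStep, h1]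
    have h2 : (j : Int) ≤ (n - 1) % 10 := by omega
    rw [pvIter, hs, ih _ h2]
    push_cast
    ring

theorem update_number_go_eq (fuel : Nat) : ∀ n k : Int, 0 ≤ k → k.toNat ≤ fuel →
    update_number_go fuel n k = pvIter k.toNat n := by
  induction fuel with
  | zero =>
    intro n k hk hf
    have : k = 0 := by omega
    subst this
    simp [update_number_go, pvIter]
  | succ f ih =>
    intro n k hk hf
    by_cases hk0 : k = 0
    · subst hk0; simp [update_number_go, pvIter]
    · have hkpos : 0 < k := by omega
      have hmod : PySem.Int.mod n 10 = n % 10 := PySem.Int.mod_eq_emod_of_pos (by norm_num)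
      have hdiv : PySem.Int.floordiv n 10 = n / 10 := PySem.Int.floordiv_eq_ediv_of_pos (by norm_num)
      have hd0 : 0 ≤ n % 10 := by omega
      have hd9 : n % 10 < 10 := by omega
      rw [update_number_go]
      simp only [hk0, if_false, hmod, hdiv]
      by_cases hd : n % 10 = 0
      · simp only [hd, if_true]
        have hrec := ih (n / 10) (k - 1) (by omega) (by omega)
        rw [hrec]
        have hk1 : k.toNat = (k - 1).toNat + 1 := by omega
        rw [hk1, pvIter]
        have : pvStep n = n / 10 := by simp [pvStep, hd]
        rw [this]
      · simp only [hd, if_false]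
        by_cases hge : n % 10 ≥ k
        · simp only [if_pos hge]
          have : (k.toNat : Int) ≤ n % 10 := by omega
          rw [pvIter_sub_run _ _ this]
          congr 1
          omega
        · simp only [if_neg hge]
          have hrec := ih (n - n % 10) (k - n % 10) (by omega) (by omega)
          rw [hrec]
          have hkk : k.toNat = (n % 10).toNat + (k - n % 10).toNat := by omega
          rw [hkk, pvIter_add]
          have hrun : pvIter (n % 10).toNat n = n - n % 10 := by
            have : ((n % 10).toNat : Int) ≤ n % 10 := by omega
            rw [pvIter_sub_run _ _ this]
            congr 1
            omega
          rw [hrun]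

theorem update_number_alt_go_eq (j : Nat) (n : Int) : update_number_alt_go j n = pvIter j n := by
  induction j generalizing n with
  | zero => rfl
  | succ j ih =>
    have hmod : PySem.Int.mod n 10 = n % 10 := PySem.Int.mod_eq_emod_of_pos (by norm_num)
    have hdiv : PySem.Int.floordiv n 10 = n / 10 := PySem.Int.floordiv_eq_ediv_of_pos (by norm_num)
    rw [update_number_alt_go, pvIter]
    rw [hmod, hdiv]
    exact ih _

-- ===== VERDICT (by name: the statement is the Claim_ definition above) =====
theorem update_number_spec : Claim_equal_update_number := by
  intro n k _ hpre
  unfold Spec_update_number update_number update_number_alt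
  rw [update_number_go_eq k.toNat n k hpre (le_refl _), update_number_alt_go_eq]
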